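-- pv_equiv track=rewrite | github.com/darrelchang03/aoc2025 | day6.py | part2
-- ===== SOURCE A (Python) =====
-- def part2(nums, ops):
--     i = 0
--     op = ops[i]
--     res = 0
--     acc = 0
--     for num in nums:
--         if not num.strip():
--             i += 1
--             op = ops[i]
--             res += acc
--             acc = 0
--             continue
--         num = int(num)
--         if op == "*":
--             if acc:
--                 acc *= num
--             else:
--                 acc = num
--         if op == "+":
--             if acc:
--                 acc += num
--             else:
--                 acc = num
--     res += acc
--     return res
-- ===== SOURCE B (Python) =====
-- def part2(nums, ops):
--     # pass 1: split into groups, one new group per blank entry (consecutive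
--     # blanks give empty groups, exactly as A's per-blank op-index advance)
--     groups = []
--     cur = []
--     for x in nums:
--         if x.strip():
--             cur.append(x)
--         else:
--             groups.append(cur)
--             cur = []
--     groups.append(cur)
--     # pass 2: evaluate each group under its operator and sum
--     res = 0
--     for idx, g in enumerate(groups):
--         op = ops[idx]
--         acc = 0
--         for x in g:
--             n = int(x)
--             if op == "*":
--                 acc = acc * n if acc else n
--             if op == "+":
--                 acc = acc + n if acc else n
--         res += acc
--     return res
-- ===== Notes on version B (the rewrite author's own statement) =====
-- stated objective: alternative
-- what changed: Replaces A's single-pass five-variable state machine by a two-pass decomposition: first split nums into groups (one per blank, preserving empty groups), then evaluate each group against ops[idx] and sum.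
import Mathlib
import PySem

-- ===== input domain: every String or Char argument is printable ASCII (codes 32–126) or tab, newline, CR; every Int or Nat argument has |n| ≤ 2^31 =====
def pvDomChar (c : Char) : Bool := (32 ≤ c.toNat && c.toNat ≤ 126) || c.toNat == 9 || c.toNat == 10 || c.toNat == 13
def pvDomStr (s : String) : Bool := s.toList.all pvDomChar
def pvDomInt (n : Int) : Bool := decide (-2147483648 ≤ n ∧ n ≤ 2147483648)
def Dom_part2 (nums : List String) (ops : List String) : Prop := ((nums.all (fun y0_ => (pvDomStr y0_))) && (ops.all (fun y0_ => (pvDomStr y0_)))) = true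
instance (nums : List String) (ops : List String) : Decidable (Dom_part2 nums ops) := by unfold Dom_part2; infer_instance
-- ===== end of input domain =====

-- B replaces A's single-pass five-variable state machine by a two-pass decomposition
-- (split nums into groups, then evaluate each group against its operator); alternative, not faster.

-- ===== PORT A =====
-- loop body of A's for-loop, state = (i, op, res, acc)
def part2Step (ops : List String) (st : Int × String × Int × Int) (num : String) :
    Int × String × Int × Int :=
  let i := st.1; let op := st.2.1; let res := st.2.2.1; let acc := st.2.2.2
  if PySem.Str.strip num = "" then
    (i + 1, PySem.List.pyGetD ops (i + 1) "", res + acc, 0)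
  else
    let n := (PySem.Int.ofStr? num).getD 0   -- int(num); Pre_ guarantees it parses
    let acc := if op = "*" then (if acc ≠ 0 then acc * n else n) else acc
    let acc := if op = "+" then (if acc ≠ 0 then acc + n else n) else acc
    (i, op, res, acc)

def part2 (nums : List String) (ops : List String) : Int :=
  let st := nums.foldl (part2Step ops) (0, PySem.List.pyGetD ops 0 "", 0, 0)
  st.2.2.1 + st.2.2.2

-- ===== PORT B =====
-- pass 1 loop body: state = (groups, cur)
def groupStep (p : List (List String) × List String) (x : String) :
    List (List String) × List String :=
  if PySem.Str.strip x = "" then (p.1 ++ [p.2], []) else (p.1, p.2 ++ [x])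

-- inner group fold of pass 2
def evalGroup (op : String) (acc : Int) : List String → Int
  | [] => acc
  | x :: g =>
      let n := (PySem.Int.ofStr? x).getD 0
      let acc := if op = "*" then (if acc ≠ 0 then acc * n else n) else acc
      let acc := if op = "+" then (if acc ≠ 0 then acc + n else n) else acc
      evalGroup op acc g

-- pass 2: for idx, g in enumerate(groups): res += evalGroup(ops[idx], 0, g)
def sumGroups (ops : List String) (idx : Int) (res : Int) : List (List String) → Int
  | [] => res
  | g :: gs => sumGroups ops (idx + 1) (res + evalGroup (PySem.List.pyGetD ops idx "") 0 g) gs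

def part2_alt (nums : List String) (ops : List String) : Int :=
  let p := nums.foldl groupStep ([], [])
  sumGroups ops 0 0 (p.1 ++ [p.2])

-- ===== PRECONDITION & SPEC =====
-- Pre_ excludes exactly the inputs where Python A raises: an IndexError when ops has no
-- entry for some (blank-delimited) group, or a ValueError when a non-blank entry is not int()-parsable.
def Pre_part2 (nums : List String) (ops : List String) : Prop :=
  nums.countP (fun s => PySem.Str.strip s = "") < ops.length ∧
  ∀ s ∈ nums, PySem.Str.strip s ≠ "" → (PySem.Int.ofStr? s).isSome
instance (nums : List String) (ops : List String) : Decidable (Pre_part2 nums ops) := by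
  unfold Pre_part2; infer_instance

def pvWitness_part2 : List String × List String := (["2", "3", "", "4", " 5 "], ["*", "+"])

def Spec_part2 (nums : List String) (ops : List String) (out : Int) : Prop := out = part2_alt nums ops
instance (nums : List String) (ops : List String) (out : Int) : Decidable (Spec_part2 nums ops out) := by unfold Spec_part2; infer_instance

-- ===== CLAIM (what is proved, stated in full; the proofs are below) =====
def Claim_equal_part2 : Prop := ∀ (nums : List String) (ops : List String), Dom_part2 nums ops → Pre_part2 nums ops → Spec_part2 nums ops (part2 nums ops)

-- ===== LEMMAS AND PROOFS =====

-- the shared per-number update rule (proof vocabulary only)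
def pvStep (op : String) (acc n : Int) : Int :=
  let acc := if op = "*" then (if acc ≠ 0 then acc * n else n) else acc
  if op = "+" then (if acc ≠ 0 then acc + n else n) else acc

-- common specification: remaining contribution of list l given op index i and current acc
def pvSpec (ops : List String) (i acc : Int) : List String → Int
  | [] => acc
  | x :: l =>
      if PySem.Str.strip x = "" then acc + pvSpec ops (i + 1) 0 l
      else pvSpec ops i (pvStep (PySem.List.pyGetD ops i "") acc ((PySem.Int.ofStr? x).getD 0)) l

-- recursive view of B's grouping pass
def pvGroups (cur : List String) : List String → List (List String)
  | [] => [cur]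
  | x :: l => if PySem.Str.strip x = "" then cur :: pvGroups [] l else pvGroups (cur ++ [x]) l

theorem aLoop_spec (ops : List String) (l : List String) :
    ∀ (i res acc : Int),
      (l.foldl (part2Step ops) (i, PySem.List.pyGetD ops i "", res, acc)).2.2.1 +
      (l.foldl (part2Step ops) (i, PySem.List.pyGetD ops i "", res, acc)).2.2.2 =
      res + pvSpec ops i acc l := by
  induction l with
  | nil => intro i res acc; simp [pvSpec]
  | cons x l ih =>
      intro i res acc
      by_cases h : PySem.Str.strip x = ""
      · simp only [List.foldl_cons, part2Step, h, if_pos, pvSpec]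
        rw [ih (i + 1) (res + acc) 0]; ring
      · simp only [List.foldl_cons, part2Step, h, if_neg, pvSpec, not_false_iff]
        rw [ih i res _]; rfl

theorem bGroups_spec (l : List String) :
    ∀ (gs : List (List String)) (cur : List String),
      (l.foldl groupStep (gs, cur)).1 ++ [(l.foldl groupStep (gs, cur)).2] =
      gs ++ pvGroups cur l := by
  induction l with
  | nil => intro gs cur; simp [pvGroups]
  | cons x l ih =>
      intro gs cur
      by_cases h : PySem.Str.strip x = ""
      · simp only [List.foldl_cons, groupStep, h, if_pos, pvGroups]
        rw [ih (gs ++ [cur]) []]; simp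
      · simp only [List.foldl_cons, groupStep, h, if_neg, pvGroups, not_false_iff]
        rw [ih gs (cur ++ [x])]

theorem evalGroup_append (op : String) (g : List String) (x : String) :
    ∀ acc : Int, evalGroup op acc (g ++ [x]) = pvStep op (evalGroup op acc g) ((PySem.Int.ofStr? x).getD 0) := by
  induction g with
  | nil => intro acc; rfl
  | cons y g ih => intro acc; simpa [evalGroup] using ih _

theorem sumGroups_pvGroups (ops : List String) (l : List String) :
    ∀ (i res : Int) (g : List String),
      sumGroups ops i res (pvGroups g l) =
      res + pvSpec ops i (evalGroup (PySem.List.pyGetD ops i "") 0 g) l := by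
  induction l with
  | nil => intro i res g; simp [pvGroups, sumGroups, pvSpec]
  | cons x l ih =>
      intro i res g
      by_cases h : PySem.Str.strip x = ""
      · simp only [pvGroups, h, if_pos, pvSpec, sumGroups]
        rw [ih (i + 1) _ []]; simp [evalGroup]; ring
      · simp only [pvGroups, h, if_neg, pvSpec, not_false_iff]
        rw [ih i res (g ++ [x]), evalGroup_append]

-- ===== VERDICT (by name: the statement is the Claim_ definition above) =====
theorem part2_spec : Claim_equal_part2 := by
  intro nums ops _ _
  unfold Spec_part2 part2 part2_alt
  have hA := aLoop_spec ops nums 0 0 0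
  have hB := bGroups_spec nums [] []
  simp only [List.nil_append] at hB
  simp only [hA, hB, sumGroups_pvGroups ops nums 0 0 []]
  simp [evalGroup]
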